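-- pv_equiv track=rewrite | github.com/ritika1dotcom/myFinalproject | spotify/views.py | find_consequent_candidates
-- ===== SOURCE A (Python) =====
-- def find_consequent_candidates(user_song_data, current_user, antecedent, min_consequent_support=5):
--     consequent_candidates = set()
--
--     for user, song_list in user_song_data.items():
--         if user != current_user:
--             found_antecedent = False
--
--             # Iterate through the user's song list
--             for song in song_list:
--                 if found_antecedent:
--                     # Add all songs that come after any song in the antecedent
--                     consequent_candidates.add(song)
--
--                 # Check if the current song is in the antecedent
--                 if song in antecedent:
--                     found_antecedent = True
--
--             # If the user is not the current user and has a sufficiently long listening history, add all songs from the user's listening history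
--             if found_antecedent and len(song_list) >= min_consequent_support:
--                 consequent_candidates.update(song_list)
--
--     return consequent_candidates
-- ===== SOURCE B (Python) =====
-- def find_consequent_candidates(user_song_data, current_user, antecedent, min_consequent_support=5):
--     candidates = set()
--     for user, song_list in user_song_data.items():
--         if user == current_user:
--             continue
--         idx = next((i for i, s in enumerate(song_list) if s in antecedent), None)
--         if idx is None:
--             continue
--         candidates.update(song_list[idx + 1:])
--         if len(song_list) >= min_consequent_support:
--             candidates.update(song_list[:idx + 1])
--     return candidates
-- ===== Notes on version B (the rewrite author's own statement) =====
-- stated objective: simpler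
-- what changed: Replaces the per-song boolean-flag accumulation with finding the index of the first antecedent song and then bulk-updating the set with the slice after it (plus, when the support threshold is met, the slice up to it), skipping users with no match.
import Mathlib
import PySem

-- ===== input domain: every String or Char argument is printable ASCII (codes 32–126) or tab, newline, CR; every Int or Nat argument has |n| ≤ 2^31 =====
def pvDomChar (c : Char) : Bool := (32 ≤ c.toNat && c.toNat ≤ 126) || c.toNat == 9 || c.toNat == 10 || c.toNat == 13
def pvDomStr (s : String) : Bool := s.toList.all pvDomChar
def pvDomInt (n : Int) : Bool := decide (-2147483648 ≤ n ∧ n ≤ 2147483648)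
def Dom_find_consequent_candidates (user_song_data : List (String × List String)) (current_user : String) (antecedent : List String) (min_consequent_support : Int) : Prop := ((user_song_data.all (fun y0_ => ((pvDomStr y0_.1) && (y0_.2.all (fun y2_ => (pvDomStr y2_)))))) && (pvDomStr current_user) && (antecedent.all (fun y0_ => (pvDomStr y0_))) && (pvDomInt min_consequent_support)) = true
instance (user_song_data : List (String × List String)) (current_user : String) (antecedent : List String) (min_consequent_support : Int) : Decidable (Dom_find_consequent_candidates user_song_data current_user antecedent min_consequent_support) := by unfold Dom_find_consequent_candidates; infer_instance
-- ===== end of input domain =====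

-- B replaces A's per-song boolean-flag set accumulation with find-first-antecedent-index then
-- bulk slice updates (simpler decomposition, same cost). Return value only; Python sets are
-- compared as sets.

-- ===== PORT A =====
def find_consequent_candidates (user_song_data : List (String × List String)) (current_user : String) (antecedent : List String) (min_consequent_support : Int) : List String :=
  user_song_data.foldl (fun acc p =>
    if p.1 != current_user then
      let st := p.2.foldl (fun (st : Bool × PySem.Set String) song =>
        (if antecedent.contains song then true else st.1,
         if st.1 then PySem.Set.add st.2 song else st.2)) (false, acc)
      if st.1 && decide ((p.2.length : Int) ≥ min_consequent_support) then
        PySem.Set.update st.2 p.2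
      else st.2
    else acc) []

-- ===== PORT B =====
def find_consequent_candidates_alt (user_song_data : List (String × List String)) (current_user : String) (antecedent : List String) (min_consequent_support : Int) : List String :=
  user_song_data.foldl (fun acc p =>
    if p.1 == current_user then acc
    else
      match p.2.findIdx? (fun s => antecedent.contains s) with
      | none => acc
      | some i =>
        let acc1 := PySem.Set.update acc (p.2.drop (i + 1))
        if decide ((p.2.length : Int) ≥ min_consequent_support) then
          PySem.Set.update acc1 (p.2.take (i + 1))
        else acc1) []

-- ===== PRECONDITION & SPEC =====
def Spec_find_consequent_candidates (user_song_data : List (String × List String)) (current_user : String) (antecedent : List String) (min_consequent_support : Int) (out : List String) : Prop := out = find_consequent_candidates_alt user_song_data current_user antecedent min_consequent_support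
instance (user_song_data : List (String × List String)) (current_user : String) (antecedent : List String) (min_consequent_support : Int) (out : List String) : Decidable (Spec_find_consequent_candidates user_song_data current_user antecedent min_consequent_support out) := by unfold Spec_find_consequent_candidates; infer_instance

-- ===== CLAIM (what is proved, stated in full; the proofs are below) =====
def Claim_equal_find_consequent_candidates : Prop := ∀ (user_song_data : List (String × List String)) (current_user : String) (antecedent : List String) (min_consequent_support : Int), Dom_find_consequent_candidates user_song_data current_user antecedent min_consequent_support → Spec_find_consequent_candidates user_song_data current_user antecedent min_consequent_support (find_consequent_candidates user_song_data current_user antecedent min_consequent_support)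

-- ===== LEMMAS AND PROOFS =====

-- with flag already true, A's inner loop just adds every song
theorem pv_inner_true (antecedent : List String) (l : List String) (acc : PySem.Set String) :
    l.foldl (fun (st : Bool × PySem.Set String) song =>
        (if antecedent.contains song then true else st.1,
         if st.1 then PySem.Set.add st.2 song else st.2)) (true, acc)
      = (true, PySem.Set.update acc l) := by
  induction l generalizing acc with
  | nil => rfl
  | cons h t ih =>
    simp only [List.foldl_cons]
    rw [show (if antecedent.contains h then true else true) = true by split <;> rfl]
    rw [ih]
    rfl

-- A's inner loop from flag=false, characterised by the first antecedent index
theorem pv_inner_none (antecedent : List String) (l : List String) (acc : PySem.Set String)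
    (h : l.findIdx? (fun s => antecedent.contains s) = none) :
    l.foldl (fun (st : Bool × PySem.Set String) song =>
        (if antecedent.contains song then true else st.1,
         if st.1 then PySem.Set.add st.2 song else st.2)) (false, acc)
      = (false, acc) := by
  induction l generalizing acc with
  | nil => rfl
  | cons x t ih =>
    rw [List.findIdx?_cons] at h
    by_cases hx : antecedent.contains x
    · have hx' : x ∈ antecedent := by simpa using hx
      simp [hx'] at h
    · simp only [List.foldl_cons, hx, Bool.false_eq_true, if_false]
      simp only [hx, Bool.false_eq_true, if_false] at h
      exact ih acc (by simpa using h)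

theorem pv_inner_some (antecedent : List String) (l : List String) (i : Nat) (acc : PySem.Set String)
    (h : l.findIdx? (fun s => antecedent.contains s) = some i) :
    l.foldl (fun (st : Bool × PySem.Set String) song =>
        (if antecedent.contains song then true else st.1,
         if st.1 then PySem.Set.add st.2 song else st.2)) (false, acc)
      = (true, PySem.Set.update acc (l.drop (i + 1))) := by
  induction l generalizing acc i with
  | nil => simp [List.findIdx?, List.findIdx?.go] at h
  | cons x t ih =>
    rw [List.findIdx?_cons] at h
    by_cases hx : antecedent.contains x
    · simp only [hx, if_pos] at h
      injection h with h; subst h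
      simp only [List.foldl_cons, hx, if_pos, Bool.false_eq_true, if_false]
      rw [pv_inner_true]
      simp
    · simp only [hx, Bool.false_eq_true, if_false, Option.map_eq_some_iff] at h
      obtain ⟨j, hj, rfl⟩ := h
      simp only [List.foldl_cons, hx, Bool.false_eq_true, if_false]
      rw [ih j acc hj]
      simp

-- updating with elements already present changes nothing
theorem pv_update_of_subset (s : PySem.Set String) (xs : List String)
    (h : ∀ x ∈ xs, x ∈ s) : PySem.Set.update s xs = s := by
  rw [PySem.Set.update_eq_append_filter]
  have : (PySem.Set.ofList xs).filter (fun y => !(PySem.Set.contains s y)) = [] := by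
    rw [List.filter_eq_nil_iff]
    intro a ha
    have has : a ∈ s := h a ((PySem.Set.mem_ofList xs a).mp ha)
    simpa using has
  rw [this, List.append_nil]

theorem pv_mem_update_right (s : PySem.Set String) (xs : List String) (x : String)
    (h : x ∈ s) : x ∈ PySem.Set.update s xs :=
  (PySem.Set.mem_update s xs x).mpr (Or.inl h)

-- A's on-the-fly suffix already sits in the set, so updating with the whole list
-- only adds the prefix part
theorem pv_update_full (acc : PySem.Set String) (l : List String) (i : Nat) :
    PySem.Set.update (PySem.Set.update acc (l.drop (i + 1))) l
      = PySem.Set.update (PySem.Set.update acc (l.drop (i + 1))) (l.take (i + 1)) := by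
  generalize hd : l.drop (i + 1) = d
  conv_lhs => rw [show l = l.take (i + 1) ++ d from by rw [← hd]; exact (List.take_append_drop _ _).symm]
  rw [PySem.Set.update_append]
  apply pv_update_of_subset
  intro x hx
  exact pv_mem_update_right _ _ _ ((PySem.Set.mem_update acc d x).mpr (Or.inr hx))

-- the per-user step of A equals the per-user step of B
theorem pv_step_eq (current_user : String) (antecedent : List String)
    (min_consequent_support : Int) (acc : PySem.Set String) (p : String × List String) :
    (if p.1 != current_user then
      let st := p.2.foldl (fun (st : Bool × PySem.Set String) song =>
        (if antecedent.contains song then true else st.1,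
         if st.1 then PySem.Set.add st.2 song else st.2)) (false, acc)
      if st.1 && decide ((p.2.length : Int) ≥ min_consequent_support) then
        PySem.Set.update st.2 p.2
      else st.2
    else acc)
    = (if p.1 == current_user then acc
    else
      match p.2.findIdx? (fun s => antecedent.contains s) with
      | none => acc
      | some i =>
        let acc1 := PySem.Set.update acc (p.2.drop (i + 1))
        if decide ((p.2.length : Int) ≥ min_consequent_support) then
          PySem.Set.update acc1 (p.2.take (i + 1))
        else acc1) := by
  by_cases hu : p.1 == current_user
  · rw [if_neg (by simp [bne, hu]), if_pos hu]
  · simp only [bne, hu, Bool.not_false, if_pos, Bool.false_eq_true, if_false]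
    cases hidx : p.2.findIdx? (fun s => antecedent.contains s) with
    | none =>
      rw [pv_inner_none antecedent p.2 acc hidx]
      simp
    | some i =>
      rw [pv_inner_some antecedent p.2 i acc hidx]
      simp only [Bool.true_and]
      by_cases hm : (p.2.length : Int) ≥ min_consequent_support
      · simp only [decide_eq_true hm, if_true]
        exact pv_update_full acc p.2 i
      · simp [hm]

-- ===== VERDICT (by name: the statement is the Claim_ definition above) =====
theorem find_consequent_candidates_spec : Claim_equal_find_consequent_candidates := by
  intro user_song_data current_user antecedent min_consequent_support hD
  clear hD
  unfold Spec_find_consequent_candidates find_consequent_candidates find_consequent_candidates_alt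
  induction user_song_data using List.reverseRecOn with
  | nil => rfl
  | append_singleton t p ih =>
    rw [List.foldl_append, List.foldl_append, ih]
    simp only [List.foldl_cons, List.foldl_nil]
    exact pv_step_eq current_user antecedent min_consequent_support _ p
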